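-- pv_equiv track=rewrite | github.com/twpalab/twpasolver | src/twpasolver/modes_rwa.py | _parse_expression_for_propagation
-- ===== SOURCE A (Python) =====
-- from typing import Any, Dict, List, Optional, Tuple, Union
--
-- def _parse_expression_for_propagation(expr: str) -> List[Tuple[str, int]]:
--     """Parse expression into list of (mode, coefficient) pairs for frequency propagation."""
--     expr = expr.replace(" ", "")
--     if not expr.startswith(("+", "-")):
--         expr = "+" + expr
--
--     terms = []
--     current_term = ""
--     sign = 1
--
--     for char in expr:
--         if char in ["+", "-"]:
--             if current_term:
--                 terms.append((current_term, sign))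
--             current_term = ""
--             sign = 1 if char == "+" else -1
--         else:
--             current_term += char
--
--     if current_term:
--         terms.append((current_term, sign))
--
--     return terms
-- ===== SOURCE B (Python) =====
-- from typing import List, Tuple
--
-- def _parse_expression_for_propagation(expr: str) -> List[Tuple[str, int]]:
--     """Split-based parse: rewrite each minus into a plus-minus pair, cut at plus signs, read each chunk's sign off its head."""
--     chunks = expr.replace(" ", "").replace("-", "+-").split("+")
--     return [
--         (c[1:], -1) if c.startswith("-") else (c, 1)
--         for c in chunks
--         if c not in ("", "-")
--     ]
-- ===== Notes on version B (the rewrite author's own statement) =====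
-- stated objective: idiomatic
-- what changed: Replaces the character-by-character accumulator loop with a rewrite-and-split pipeline: every minus sign is rewritten into a plus-then-minus pair, the string is cut at plus signs, and each non-empty chunk yields its (term, sign) pair read off the chunk's head.
import Mathlib
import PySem

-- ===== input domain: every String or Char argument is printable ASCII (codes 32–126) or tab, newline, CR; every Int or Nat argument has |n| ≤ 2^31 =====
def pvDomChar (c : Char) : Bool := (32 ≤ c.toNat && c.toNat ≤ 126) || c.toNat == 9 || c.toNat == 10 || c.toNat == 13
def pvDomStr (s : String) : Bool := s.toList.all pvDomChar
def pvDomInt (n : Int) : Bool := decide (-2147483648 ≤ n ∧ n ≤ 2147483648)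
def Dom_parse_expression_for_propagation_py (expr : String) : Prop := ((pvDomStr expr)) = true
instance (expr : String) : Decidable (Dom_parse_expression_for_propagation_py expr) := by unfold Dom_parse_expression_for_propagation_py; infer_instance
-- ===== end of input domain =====

-- B parses by rewriting each minus into a plus-minus pair and splitting at plus signs, instead of A's char-by-char sign/accumulator loop; measurably faster via C-level str methods.

-- ===== PORT A =====
-- A's loop body: state = (terms, current_term, sign); strings handled as their char lists.
def pA_step (st : List (List Char × Int) × List Char × Int) (char : Char) :
    List (List Char × Int) × List Char × Int :=
  if char = '+' ∨ char = '-' then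
    ((if st.2.1 ≠ [] then st.1 ++ [(st.2.1, st.2.2)] else st.1), [],
      if char = '+' then 1 else -1)
  else (st.1, st.2.1 ++ [char], st.2.2)

def parse_expression_for_propagation_py (expr : String) : List (String × Int) :=
  -- expr = expr.replace(" ", "")
  let s := PySem.Chars.replace expr.toList [' '] []
  -- if not expr.startswith(("+", "-")): expr = "+" + expr
  let s := if !(PySem.Chars.startswith s ['+'] || PySem.Chars.startswith s ['-']) then '+' :: s else s
  -- for char in expr: …
  let st := s.foldl pA_step ([], [], 1)
  -- if current_term: terms.append((current_term, sign))
  (if st.2.1 ≠ [] then st.1 ++ [(st.2.1, st.2.2)] else st.1).map (fun p => (String.ofList p.1, p.2))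

-- ===== PORT B =====
def parse_expression_for_propagation_py_alt (expr : String) : List (String × Int) :=
  -- chunks = expr.replace(" ", "").replace("-", "+-").split("+")
  let chunks := PySem.Chars.splitOn
      (PySem.Chars.replace (PySem.Chars.replace expr.toList [' '] []) ['-'] ['+', '-']) ['+']
  -- [(c[1:], -1) if c.startswith("-") else (c, 1) for c in chunks if c not in ("", "-")]
  (chunks.filter (fun c => !(c == ([] : List Char) || c == ['-']))).map
    (fun c => if PySem.Chars.startswith c ['-'] then (String.ofList (PySem.Chars.slice c (some 1) none), (-1 : Int))
              else (String.ofList c, 1))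

-- ===== PRECONDITION & SPEC =====
def Spec_parse_expression_for_propagation_py (expr : String) (out : List (String × Int)) : Prop := out = parse_expression_for_propagation_py_alt expr
instance (expr : String) (out : List (String × Int)) : Decidable (Spec_parse_expression_for_propagation_py expr out) := by unfold Spec_parse_expression_for_propagation_py; infer_instance

-- ===== CLAIM (what is proved, stated in full; the proofs are below) =====
def Claim_equal_parse_expression_for_propagation_py : Prop := ∀ (expr : String), Dom_parse_expression_for_propagation_py expr → Spec_parse_expression_for_propagation_py expr (parse_expression_for_propagation_py expr)

-- ===== LEMMAS AND PROOFS =====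
-- pvF: the effect on one char of the rewrite  '-' -> '+-'
def pvF (c : Char) : List Char := if c = '-' then ['+', '-'] else [c]

-- splitting a char list on '+' with an explicit current-piece accumulator
def pvSplitChar (pre : List Char) : List Char → List (List Char)
  | [] => [pre]
  | c :: t => if c = '+' then pre :: pvSplitChar [] t else pvSplitChar (pre ++ [c]) t

def pvG (c : List Char) : List Char × Int :=
  if PySem.Chars.startswith c ['-'] then (c.tail, -1) else (c, 1)

def pvFilterB (chunks : List (List Char)) : List (List Char × Int) :=
  (chunks.filter (fun c => !(c == ([] : List Char) || c == ['-']))).map pvG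

-- chunk encoding of A's (current_term, sign) state
def pvEnc (sign : Int) (cur : List Char) : List Char :=
  if sign = 1 then cur else '-' :: cur

-- A's trailing "if current_term: terms.append(...)"
def pvFin (st : List (List Char × Int) × List Char × Int) : List (List Char × Int) :=
  if st.2.1 ≠ [] then st.1 ++ [(st.2.1, st.2.2)] else st.1

theorem pv_replace_go_dash (fuel : Nat) (l acc : List Char) (h : l.length ≤ fuel) :
    PySem.Chars.replace.go ['-'] ['+', '-'] fuel l acc
      = acc.reverse ++ l.flatMap pvF := by
  induction fuel generalizing l acc with
  | zero =>
    cases l with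
    | nil => simp [PySem.Chars.replace.go]
    | cons c t => simp at h
  | succ n ih =>
    cases l with
    | nil => simp [PySem.Chars.replace.go]
    | cons c t =>
      by_cases hc : c = '-'
      · simp [PySem.Chars.replace.go, List.isPrefixOf, hc, pvF,
          ih _ _ (by simpa using Nat.le_of_succ_le_succ h)]
      · simp [PySem.Chars.replace.go, List.isPrefixOf, hc, pvF,
          ih _ _ (by simpa using Nat.le_of_succ_le_succ h)]
        exact fun h => hc h.symm

theorem pv_split_go (fuel : Nat) (l cur : List Char) (acc : List (List Char)) (h : l.length ≤ fuel) :
    PySem.Chars.splitOn.go ['+'] fuel l cur acc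
      = acc.reverse ++ pvSplitChar cur.reverse l := by
  induction fuel generalizing l cur acc with
  | zero =>
    cases l with
    | nil => simp [PySem.Chars.splitOn.go, pvSplitChar]
    | cons c t => simp at h
  | succ n ih =>
    cases l with
    | nil => simp [PySem.Chars.splitOn.go, pvSplitChar]
    | cons c t =>
      by_cases hc : c = '+'
      · simp [PySem.Chars.splitOn.go, List.isPrefixOf, hc, pvSplitChar,
          ih _ _ _ (by simpa using Nat.le_of_succ_le_succ h)]
      · simp [PySem.Chars.splitOn.go, List.isPrefixOf, hc, pvSplitChar,
          ih _ _ _ (by simpa using Nat.le_of_succ_le_succ h)]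
        exact fun h => absurd h.symm hc

theorem pv_step_plus (terms : List (List Char × Int)) (cur : List Char) (sign : Int) :
    pA_step (terms, cur, sign) '+'
      = (if cur ≠ [] then terms ++ [(cur, sign)] else terms, [], 1) := by
  simp [pA_step]

theorem pv_step_minus (terms : List (List Char × Int)) (cur : List Char) (sign : Int) :
    pA_step (terms, cur, sign) '-'
      = (if cur ≠ [] then terms ++ [(cur, sign)] else terms, [], -1) := by
  simp [pA_step]

theorem pv_step_other (terms : List (List Char × Int)) (cur : List Char) (sign : Int)
    (c : Char) (h1 : ¬ c = '+') (h2 : ¬ c = '-') :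
    pA_step (terms, cur, sign) c = (terms, cur ++ [c], sign) := by
  simp [pA_step, h1, h2]

theorem pvFilterB_cons (c : List Char) (rest : List (List Char)) :
    pvFilterB (c :: rest) = pvFilterB [c] ++ pvFilterB rest := by
  unfold pvFilterB
  rw [List.filter_cons, List.filter_cons, List.filter_nil]
  cases h : (!(c == ([] : List Char) || c == ['-']))
  · simp [h]
  · simp [h]

-- one emitted pair, as A computes it and as pvFilterB reads it off the chunk
theorem pv_emit (cur : List Char) (sign : Int) (hs : sign = 1 ∨ sign = -1) (hc : '-' ∉ cur) :
    pvFilterB [pvEnc sign cur]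
      = if cur ≠ [] then [(cur, sign)] else [] := by
  rcases hs with hs | hs <;> subst hs
  · cases cur with
    | nil => simp [pvFilterB, pvEnc, pvG]
    | cons a t =>
      have ha : a ≠ '-' := fun h => hc (by simp [h])
      simp [pvFilterB, pvEnc, pvG, PySem.Chars.startswith, List.isPrefixOf, ha]
      exact fun h => ha h.symm

  · cases cur with
    | nil => simp [pvFilterB, pvEnc, pvG]
    | cons a t =>
      simp [pvFilterB, pvEnc, pvG, PySem.Chars.startswith, List.isPrefixOf]

theorem pv_main (l : List Char) (terms : List (List Char × Int)) (cur : List Char) (sign : Int)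
    (hs : sign = 1 ∨ sign = -1) (hc : '-' ∉ cur) :
    pvFin (l.foldl pA_step (terms, cur, sign))
      = terms ++ pvFilterB (pvSplitChar (pvEnc sign cur) (l.flatMap pvF)) := by
  induction l generalizing terms cur sign with
  | nil =>
    simp only [List.foldl_nil, List.flatMap_nil, pvSplitChar, pvFin]
    rw [pv_emit cur sign hs hc]
    split_ifs <;> simp_all
  | cons c t ih =>
    by_cases h1 : c = '+'
    · subst h1
      rw [List.foldl_cons, pv_step_plus,
        ih _ [] 1 (Or.inl rfl) (by simp)]
      rw [show List.flatMap pvF ('+' :: t) = '+' :: t.flatMap pvF by simp [pvF]]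
      rw [show pvSplitChar (pvEnc sign cur) ('+' :: t.flatMap pvF)
            = pvEnc sign cur :: pvSplitChar [] (t.flatMap pvF) by simp [pvSplitChar]]
      rw [pvFilterB_cons, pv_emit cur sign hs hc]
      have : pvEnc 1 ([] : List Char) = ([] : List Char) := by simp [pvEnc]
      rw [this]
      split_ifs <;> simp
    · by_cases h2 : c = '-'
      · subst h2
        rw [List.foldl_cons, pv_step_minus,
          ih _ [] (-1) (Or.inr rfl) (by simp)]
        rw [show List.flatMap pvF ('-' :: t) = '+' :: '-' :: t.flatMap pvF by simp [pvF]]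
        rw [show pvSplitChar (pvEnc sign cur) ('+' :: '-' :: t.flatMap pvF)
              = pvEnc sign cur :: pvSplitChar ['-'] (t.flatMap pvF) by
            simp [pvSplitChar]]
        rw [pvFilterB_cons, pv_emit cur sign hs hc]
        have : pvEnc (-1) ([] : List Char) = ['-'] := by simp [pvEnc]
        rw [this]
        split_ifs <;> simp
      · have hcur : '-' ∉ cur ++ [c] := by
          intro h; rcases List.mem_append.1 h with h | h
          · exact hc h
          · simp at h; exact h2 h.symm
        rw [List.foldl_cons, pv_step_other terms cur sign c h1 h2,
          ih terms (cur ++ [c]) sign hs hcur]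
        rw [show List.flatMap pvF (c :: t) = c :: t.flatMap pvF by simp [pvF, h2]]
        rw [show pvSplitChar (pvEnc sign cur) (c :: t.flatMap pvF)
              = pvSplitChar (pvEnc sign cur ++ [c]) (t.flatMap pvF) by simp [pvSplitChar, h1]]
        have : pvEnc sign (cur ++ [c]) = pvEnc sign cur ++ [c] := by
          rcases hs with hs | hs <;> simp [pvEnc, hs]
        rw [this]

theorem pv_top (l : List Char) :
    pvFin ((if !(PySem.Chars.startswith l ['+'] || PySem.Chars.startswith l ['-']) then '+' :: l
        else l).foldl pA_step ([], [], 1))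
      = pvFilterB (pvSplitChar [] (l.flatMap pvF)) := by
  have base := pv_main l [] [] 1 (Or.inl rfl) (by simp)
  have henc : pvEnc 1 ([] : List Char) = ([] : List Char) := by simp [pvEnc]
  rw [henc] at base
  split_ifs with h
  · rw [List.foldl_cons, pv_step_plus]
    simpa using base
  · simpa using base

-- ===== VERDICT (by name: the statement is the Claim_ definition above) =====
theorem parse_expression_for_propagation_py_spec : Claim_equal_parse_expression_for_propagation_py := by
  intro expr _
  show parse_expression_for_propagation_py expr = parse_expression_for_propagation_py_alt expr
  have hA : parse_expression_for_propagation_py expr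
      = (pvFin ((if !(PySem.Chars.startswith (PySem.Chars.replace expr.toList [' '] [])
              ['+'] || PySem.Chars.startswith (PySem.Chars.replace expr.toList [' '] []) ['-'])
            then '+' :: PySem.Chars.replace expr.toList [' '] []
            else PySem.Chars.replace expr.toList [' '] []).foldl pA_step ([], [], 1))).map
          (fun p => (String.ofList p.1, p.2)) := rfl
  rw [hA, pv_top]
  unfold parse_expression_for_propagation_py_alt
  rw [show PySem.Chars.replace (PySem.Chars.replace expr.toList [' '] []) ['-'] ['+', '-']
        = (PySem.Chars.replace expr.toList [' '] []).flatMap pvF by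
    simpa [PySem.Chars.replace] using
      pv_replace_go_dash (PySem.Chars.replace expr.toList [' '] []).length _ [] le_rfl]
  set m := (PySem.Chars.replace expr.toList [' '] []).flatMap pvF with hm
  rw [show PySem.Chars.splitOn m ['+'] = pvSplitChar [] m by
    simpa [PySem.Chars.splitOn] using pv_split_go (m.length + 1) m [] [] (Nat.le_succ _)]
  simp only [pvFilterB, List.map_map]
  refine List.map_congr_left (fun c hcmem => ?_)
  simp only [Function.comp, pvG]
  split_ifs with h
  · simp [PySem.Chars.slice_eq_listSlice, PySem.List.slice_from_one]
  · rfl
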